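-- pv_equiv track=rewrite | github.com/marzukr/google-foobar | 2_1.py | stringAdd
-- ===== SOURCE A (Python) =====
-- def stringAdd(xa):
--     result = ""
--     shouldContinue = True
--     i = 0
--     rem = 0
--     while shouldContinue:
--         shouldContinue = False
--         total = rem
--         for num in xa:
--             if len(num) > i:
--                 total += int(num[len(num) - 1 - i])
--                 shouldContinue = True
--         if shouldContinue:
--             result += str(total % 10)
--             if total >= 10:
--                 rem = total // 10
--             else:
--                 rem = 0
--             i += 1
--     if rem != 0:
--         result += str(rem)[::-1]
--     return result[::-1]
-- ===== SOURCE B (Python) =====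
-- def stringAdd(xa):
--     width = 0
--     for x in xa:
--         width = max(width, len(x))
--     if width == 0:
--         return ""
--     total = 0
--     for x in xa:
--         n = 0
--         for c in x:
--             n = 10 * n + int(c)
--         total += n
--     return str(total).zfill(width)
-- ===== Notes on version B (the rewrite author's own statement) =====
-- stated objective: alternative
-- what changed: A adds column by column over all strings with an explicit carry, emitting one output digit per column; B converts each string to an integer (Horner loop), sums the integers once, and formats the sum with str().zfill(max length).
import Mathlib
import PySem

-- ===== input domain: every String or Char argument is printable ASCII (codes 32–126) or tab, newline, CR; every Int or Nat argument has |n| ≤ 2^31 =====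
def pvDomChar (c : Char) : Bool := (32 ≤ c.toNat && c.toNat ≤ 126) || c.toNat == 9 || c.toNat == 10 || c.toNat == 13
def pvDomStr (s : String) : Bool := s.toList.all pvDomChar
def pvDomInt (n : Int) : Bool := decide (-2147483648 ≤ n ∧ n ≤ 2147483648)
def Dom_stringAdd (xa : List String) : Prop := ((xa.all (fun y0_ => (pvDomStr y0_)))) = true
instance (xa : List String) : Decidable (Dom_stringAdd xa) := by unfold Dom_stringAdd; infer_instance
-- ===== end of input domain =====

-- B replaces A's column-by-column digit loop with carry by converting each string to an
-- integer once (Horner loop), summing, and formatting the sum with str().zfill(max length);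
-- an alternative algorithm with the same results.

-- ===== PORT A =====

-- Python's int(c) applied to a one-character string (both sources only ever call int on one digit character).
def pvDigit (c : Char) : Int := (PySem.Int.ofChars? [c]).getD 0

-- body of A's inner 'for num in xa' loop (state = (total, shouldContinue))
def pvStepA (i : Nat) (st : Int × Bool) (num : List Char) : Int × Bool :=
  if num.length > i then
    (st.1 + pvDigit ((PySem.List.pyGet? num (PySem.List.len num - 1 - (i : Int))).getD ' '), true)
  else st

-- termination measure helper (proof apparatus, not part of the Python)
def pvMaxLen (ls : List (List Char)) : Nat := ls.foldl (fun m n => max m n.length) 0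

theorem pvStepA_cont (i : Nat) (ls : List (List Char)) :
    ∀ st : Int × Bool, (ls.foldl (pvStepA i) st).2 = true → st.2 = true ∨ ∃ n ∈ ls, i < n.length := by
  induction ls with
  | nil => intro st h; exact Or.inl h
  | cons x t ih =>
    intro st h
    rw [List.foldl_cons] at h
    rcases ih _ h with h1 | ⟨n, hn, hl⟩
    · by_cases hx : x.length > i
      · exact Or.inr ⟨x, List.mem_cons_self .., hx⟩
      · left; simpa [pvStepA, hx] using h1
    · exact Or.inr ⟨n, List.mem_cons_of_mem _ hn, hl⟩

theorem pvMaxLen_lt {ls : List (List Char)} {i : Nat} (h : ∃ n ∈ ls, i < n.length) :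
    i < pvMaxLen ls := by
  obtain ⟨n, hn, hl⟩ := h
  have := (PySem.List.le_foldl_max_nat ls (fun n => n.length) 0).2 n hn
  unfold pvMaxLen
  omega

-- A's 'while shouldContinue' loop, followed by A's final 'if rem != 0' step
def stringAddLoopA (ls : List (List Char)) (i : Nat) (rem : Int) (result : List Char) : List Char :=
  if hs : (ls.foldl (pvStepA i) (rem, false)).2 = true then
    stringAddLoopA ls (i + 1)
      (if (ls.foldl (pvStepA i) (rem, false)).1 ≥ 10 then
        PySem.Int.floordiv (ls.foldl (pvStepA i) (rem, false)).1 10 else 0)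
      (result ++ PySem.Int.toChars (PySem.Int.mod (ls.foldl (pvStepA i) (rem, false)).1 10))
  else
    if rem ≠ 0 then result ++ (PySem.Int.toChars rem).reverse else result
termination_by pvMaxLen ls - i
decreasing_by
  rcases pvStepA_cont i ls (rem, false) hs with hc | hex
  · simp at hc
  · have := pvMaxLen_lt hex; omega

def stringAdd (xa : List String) : String :=
  String.ofList ((stringAddLoopA (xa.map String.toList) 0 0 []).reverse)

-- ===== PORT B =====
def stringAdd_alt (xa : List String) : String :=
  let width : Int := xa.foldl (fun w x => max w (PySem.Str.len x)) 0
  if width = 0 then ""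
  else
    let total : Int :=
      xa.foldl (fun t x => t + x.toList.foldl (fun n c => 10 * n + pvDigit c) 0) 0
    PySem.Str.zfill (PySem.Int.toStr total) width

-- ===== PRECONDITION & SPEC =====
-- Pre_: every character of every string is a decimal digit — exactly the inputs on which
-- Python's int() inside A does not raise ValueError.
def Pre_stringAdd (xa : List String) : Prop :=
  (xa.all (fun s => s.toList.all (fun c => c.isDigit))) = true
instance (xa : List String) : Decidable (Pre_stringAdd xa) := by unfold Pre_stringAdd; infer_instance

def pvWitness_stringAdd : List String := ["007", "95", ""]

def Spec_stringAdd (xa : List String) (out : String) : Prop := out = stringAdd_alt xa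
instance (xa : List String) (out : String) : Decidable (Spec_stringAdd xa out) := by unfold Spec_stringAdd; infer_instance

-- ===== CLAIM (what is proved, stated in full; the proofs are below) =====
def Claim_equal_stringAdd : Prop :=
  ∀ (xa : List String), Dom_stringAdd xa → Pre_stringAdd xa → Spec_stringAdd xa (stringAdd xa)

-- ===== LEMMAS AND PROOFS =====

def pvAllDig (cs : List Char) : Prop := ∀ c ∈ cs, c.isDigit = true

def pvVal (cs : List Char) : Nat := cs.foldl (fun n c => 10 * n + (c.toNat - 48)) 0

def pvN (ls : List (List Char)) : Nat := (ls.map pvVal).sum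

-- little-endian digits of m, first k columns forced, then the remaining digits of m / 10^k
def pvLE : Nat → Nat → List Char
  | m, 0 => if m = 0 then [] else (Nat.toDigits 10 m).reverse
  | m, k + 1 => (m % 10).digitChar :: pvLE (m / 10) k

theorem char_digit_mem {c : Char} (h : c.isDigit = true) :
    c ∈ ['0', '1', '2', '3', '4', '5', '6', '7', '8', '9'] := by
  have hb : 48 ≤ c.toNat ∧ c.toNat ≤ 57 := by
    simp [Char.isDigit] at h
    exact ⟨h.1, h.2⟩
  have heq : ∀ d : Char, c.toNat = d.toNat → c = d := by
    intro d hd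
    apply Char.ext
    exact UInt32.toNat_inj.mp hd
  obtain ⟨n, hn⟩ : ∃ n, c.toNat = n := ⟨_, rfl⟩
  have h1 : 48 ≤ n := hn ▸ hb.1
  have h2 : n ≤ 57 := hn ▸ hb.2
  interval_cases n <;>
    (simp only [List.mem_cons]
     first
       | exact Or.inl (heq _ hn)
       | exact Or.inr (Or.inl (heq _ hn))
       | exact Or.inr (Or.inr (Or.inl (heq _ hn)))
       | exact Or.inr (Or.inr (Or.inr (Or.inl (heq _ hn))))
       | exact Or.inr (Or.inr (Or.inr (Or.inr (Or.inl (heq _ hn)))))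
       | exact Or.inr (Or.inr (Or.inr (Or.inr (Or.inr (Or.inl (heq _ hn))))))
       | exact Or.inr (Or.inr (Or.inr (Or.inr (Or.inr (Or.inr (Or.inl (heq _ hn)))))))
       | exact Or.inr (Or.inr (Or.inr (Or.inr (Or.inr (Or.inr (Or.inr (Or.inl (heq _ hn))))))))
       | exact Or.inr (Or.inr (Or.inr (Or.inr (Or.inr (Or.inr (Or.inr (Or.inr (Or.inl (heq _ hn)))))))))
       | exact Or.inr (Or.inr (Or.inr (Or.inr (Or.inr (Or.inr (Or.inr (Or.inr (Or.inr (Or.inl (heq _ hn)))))))))))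

theorem digit_bounds {c : Char} (h : c.isDigit = true) : 48 ≤ c.toNat ∧ c.toNat ≤ 57 := by
  have := char_digit_mem h
  fin_cases this <;> decide

theorem pvDigit_eq {c : Char} (h : c.isDigit = true) :
    pvDigit c = ((c.toNat - 48 : Nat) : Int) := by
  have := char_digit_mem h
  fin_cases this <;> decide

theorem pvVal_append (cs : List Char) (c : Char) :
    pvVal (cs ++ [c]) = 10 * pvVal cs + (c.toNat - 48) := by
  simp [pvVal, List.foldl_append]

theorem pvVal_lt_aux :
    ∀ (cs : List Char), pvAllDig cs → ∀ a : Nat,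
      cs.foldl (fun n c => 10 * n + (c.toNat - 48)) a < (a + 1) * 10 ^ cs.length := by
  intro cs
  induction cs with
  | nil => intro _ a; simp
  | cons c t ih =>
    intro hd a
    have hc := digit_bounds (hd c (List.mem_cons_self ..))
    have h2 := ih (fun x hx => hd x (List.mem_cons_of_mem _ hx)) (10 * a + (c.toNat - 48))
    have h3 : (10 * a + (c.toNat - 48) + 1) * 10 ^ t.length ≤ ((a + 1) * 10) * 10 ^ t.length :=
      Nat.mul_le_mul_right _ (by omega)
    calc (c :: t).foldl (fun n c => 10 * n + (c.toNat - 48)) a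
        = t.foldl (fun n c => 10 * n + (c.toNat - 48)) (10 * a + (c.toNat - 48)) := rfl
      _ < (10 * a + (c.toNat - 48) + 1) * 10 ^ t.length := h2
      _ ≤ ((a + 1) * 10) * 10 ^ t.length := h3
      _ = (a + 1) * 10 ^ (c :: t).length := by
          rw [List.length_cons, pow_succ]
          ring

theorem pvVal_lt {cs : List Char} (hd : pvAllDig cs) : pvVal cs < 10 ^ cs.length := by
  simpa [pvVal] using pvVal_lt_aux cs hd 0

theorem pvVal_div_eq_zero {cs : List Char} (hd : pvAllDig cs) {i : Nat} (h : cs.length ≤ i) :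
    pvVal cs / 10 ^ i = 0 :=
  Nat.div_eq_of_lt (lt_of_lt_of_le (pvVal_lt hd) (Nat.pow_le_pow_right (by norm_num) h))

theorem pvVal_digit :
    ∀ (cs : List Char), pvAllDig cs → ∀ i, i < cs.length →
      (cs.getD (cs.length - 1 - i) ' ').toNat - 48 = pvVal cs / 10 ^ i % 10 := by
  intro cs
  induction cs using List.reverseRecOn with
  | nil => intro _ i hi; simp at hi
  | append_singleton t c ih =>
    intro hd i hi
    have hdt : pvAllDig t := fun x hx => hd x (List.mem_append_left _ hx)
    have hdc := digit_bounds (hd c (by simp))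
    cases i with
    | zero =>
      have hidx : (t ++ [c]).length - 1 - 0 = t.length := by simp
      have hgd : (t ++ [c]).getD t.length ' ' = c := by
        rw [List.getD_eq_getElem _ _ (by simp)]
        simp
      rw [hidx, hgd, pvVal_append]
      simp
      omega
    | succ j =>
      have hj : j < t.length := by
        simp at hi; omega
      have hidx : (t ++ [c]).length - 1 - (j + 1) = t.length - 1 - j := by simp; omega
      have hlt : t.length - 1 - j < t.length := by omega
      rw [hidx, List.getD_append _ _ _ _ hlt, ih hdt j hj, pvVal_append]
      have h10 : 10 ^ (j + 1) = 10 * 10 ^ j := by rw [pow_succ]; ring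
      rw [h10, ← Nat.div_div_eq_div_mul]
      have hq : (10 * pvVal t + (c.toNat - 48)) / 10 = pvVal t := by omega
      rw [hq]

theorem foldA_eq (i : Nat) :
    ∀ (ls : List (List Char)), (∀ n ∈ ls, pvAllDig n) → ∀ (r : Int) (b : Bool),
      ls.foldl (pvStepA i) (r, b) =
        (r + (((ls.map (fun n => pvVal n / 10 ^ i % 10)).sum : Nat) : Int),
         b || ls.any (fun n => decide (i < n.length))) := by
  intro ls
  induction ls with
  | nil => intro _ r b; simp
  | cons x t ih =>
    intro hd r b
    have hdx : pvAllDig x := hd x (List.mem_cons_self ..)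
    have hdt : ∀ n ∈ t, pvAllDig n := fun n hn => hd n (List.mem_cons_of_mem _ hn)
    rw [List.foldl_cons]
    by_cases hx : i < x.length
    · have hidx : (PySem.List.len x - 1 - (i : Int)) = ((x.length - 1 - i : Nat) : Int) := by
        rw [PySem.List.len_eq]; push_cast; omega
      have hstep : pvStepA i (r, b) x =
          (r + (((pvVal x / 10 ^ i % 10 : Nat)) : Int), true) := by
        have hran : x.length - 1 - i < x.length := by omega
        have hmem : x.getD (x.length - 1 - i) ' ' ∈ x := by
          rw [List.getD_eq_getElem x ' ' hran]
          exact List.getElem_mem _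
        have hdig : (x.getD (x.length - 1 - i) ' ').isDigit = true := hdx _ hmem
        simp only [pvStepA, if_pos hx, hidx, PySem.List.pyGet?_natCast]
        rw [show (x[(x.length - 1 - i : Nat)]?).getD ' ' = x.getD (x.length - 1 - i) ' ' from rfl]
        rw [pvDigit_eq hdig, pvVal_digit x hdx i hx]
      rw [hstep, ih hdt _ true]
      simp only [Prod.mk.injEq, List.map_cons, List.sum_cons]
      refine ⟨by push_cast; ring, by simp [hx]⟩

    · have hstep : pvStepA i (r, b) x = (r, b) := by simp [pvStepA, hx]
      rw [hstep, ih hdt r b]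
      have hz : pvVal x / 10 ^ i % 10 = 0 := by
        rw [pvVal_div_eq_zero hdx (Nat.le_of_not_lt hx)]
      simp only [Prod.mk.injEq, List.map_cons, List.sum_cons, hz]
      refine ⟨by push_cast; ring, by simp [hx]⟩

theorem foldmax_attained :
    ∀ (ls : List (List Char)) (a i : Nat),
      i < ls.foldl (fun m n => max m n.length) a → i < a ∨ ∃ n ∈ ls, i < n.length := by
  intro ls
  induction ls with
  | nil => intro a i h; exact Or.inl h
  | cons x t ih =>
    intro a i h
    rcases ih (max a x.length) i h with h1 | ⟨n, hn, hl⟩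
    · rcases Nat.lt_or_ge i a with h2 | h2
      · exact Or.inl h2
      · exact Or.inr ⟨x, List.mem_cons_self .., by omega⟩
    · exact Or.inr ⟨n, List.mem_cons_of_mem _ hn, hl⟩

theorem pvMaxLen_attained {ls : List (List Char)} {i : Nat} (h : i < pvMaxLen ls) :
    ∃ n ∈ ls, i < n.length := by
  rcases foldmax_attained ls 0 i h with h1 | h2
  · omega
  · exact h2

theorem sum_split (ls : List (List Char)) (f g h : List Char → Nat)
    (hp : ∀ n ∈ ls, f n = 10 * g n + h n) :
    (ls.map f).sum = 10 * (ls.map g).sum + (ls.map h).sum := by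
  induction ls with
  | nil => simp
  | cons x t ih =>
    simp only [List.map_cons, List.sum_cons]
    rw [hp x (List.mem_cons_self ..), ih (fun n hn => hp n (List.mem_cons_of_mem _ hn))]
    ring

theorem loopA_done (ls : List (List Char)) (hd : ∀ n ∈ ls, pvAllDig n)
    (i : Nat) (r : Nat) (res : List Char) (h : pvMaxLen ls ≤ i)
    (hinv : r + (ls.map (fun n => pvVal n / 10 ^ i)).sum = pvN ls / 10 ^ i) :
    stringAddLoopA ls i (r : Int) res = res ++ pvLE (pvN ls / 10 ^ i) 0 := by
  have hall : ∀ n ∈ ls, ¬ i < n.length := by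
    intro n hn hlt
    have := pvMaxLen_lt ⟨n, hn, hlt⟩
    omega
  have hzero : ∀ n ∈ ls, pvVal n / 10 ^ i = 0 := fun n hn =>
    pvVal_div_eq_zero (hd n hn) (Nat.le_of_not_lt (hall n hn))
  have hsum : (ls.map (fun n => pvVal n / 10 ^ i)).sum = 0 := by
    apply List.sum_eq_zero
    intro x hx
    obtain ⟨n, hn, rfl⟩ := List.mem_map.mp hx
    exact hzero n hn
  have hr : r = pvN ls / 10 ^ i := by omega
  have hany : ls.any (fun n => decide (i < n.length)) = false := by
    simp only [List.any_eq_false]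
    intro n hn
    simp [hall n hn]
  rw [stringAddLoopA]
  rw [foldA_eq i ls hd (r : Int) false]
  simp only [hany, Bool.false_or]
  rw [dif_neg (by simp)]
  subst hr
  by_cases h0 : pvN ls / 10 ^ i = 0
  · rw [h0]
    simp [pvLE]
  · rw [if_pos (by exact_mod_cast h0)]
    have htc : PySem.Int.toChars ((pvN ls / 10 ^ i : Nat) : Int)
        = Nat.toDigits 10 (pvN ls / 10 ^ i) := by
      simp only [PySem.Int.toChars]
      rw [if_neg (Int.not_lt.mpr (Int.natCast_nonneg _)), Int.toNat_natCast]
    rw [htc]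
    simp [pvLE, h0]

theorem loopA_eq (ls : List (List Char)) (hd : ∀ n ∈ ls, pvAllDig n) :
    ∀ (k i : Nat) (r : Nat) (res : List Char), pvMaxLen ls ≤ i + k →
      r + (ls.map (fun n => pvVal n / 10 ^ i)).sum = pvN ls / 10 ^ i →
      stringAddLoopA ls i (r : Int) res = res ++ pvLE (pvN ls / 10 ^ i) (pvMaxLen ls - i) := by
  intro k
  induction k with
  | zero =>
    intro i r res h hinv
    have h0 : pvMaxLen ls - i = 0 := by omega
    rw [h0]
    exact loopA_done ls hd i r res (by omega) hinv
  | succ k ih =>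
    intro i r res h hinv
    by_cases hlt : i < pvMaxLen ls
    · have hex := pvMaxLen_attained hlt
      have hany : ls.any (fun n => decide (i < n.length)) = true := by
        obtain ⟨n, hn, hl⟩ := hex
        exact List.any_eq_true.mpr ⟨n, hn, by simp [hl]⟩
      have hsplit : (ls.map (fun n => pvVal n / 10 ^ i)).sum
          = 10 * (ls.map (fun n => pvVal n / 10 ^ (i + 1))).sum
            + (ls.map (fun n => pvVal n / 10 ^ i % 10)).sum := by
        apply sum_split
        intro n hn
        have h1 : 10 ^ (i + 1) = 10 ^ i * 10 := by rw [pow_succ]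
        rw [h1, ← Nat.div_div_eq_div_mul]
        omega
      have hNsucc : pvN ls / 10 ^ (i + 1) = pvN ls / 10 ^ i / 10 := by
        rw [pow_succ, ← Nat.div_div_eq_div_mul]
      rw [stringAddLoopA]
      rw [foldA_eq i ls hd (r : Int) false]
      simp only [hany, Bool.false_or]
      rw [dif_pos trivial]
      set sd := (ls.map (fun n => pvVal n / 10 ^ i % 10)).sum with hsd
      set sg := (ls.map (fun n => pvVal n / 10 ^ (i + 1))).sum with hsg
      have hcast : ((r : Int) + ((sd : Nat) : Int)) = (((r + sd : Nat) : Nat) : Int) := by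
        push_cast; ring
      have hrem :
          (if (r : Int) + ((sd : Nat) : Int) ≥ 10 then
            PySem.Int.floordiv ((r : Int) + ((sd : Nat) : Int)) 10 else 0) =
          (((r + sd) / 10 : Nat) : Int) := by
        rw [hcast]
        by_cases hge : 10 ≤ r + sd
        · rw [if_pos (by exact_mod_cast hge)]
          exact_mod_cast PySem.Int.floordiv_natCast (r + sd) 10
        · rw [if_neg (by push_cast; omega)]
          have hq : (r + sd) / 10 = 0 := Nat.div_eq_of_lt (by omega)
          rw [hq]; rfl
      have hmod : PySem.Int.mod ((r : Int) + ((sd : Nat) : Int)) 10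
          = (((r + sd) % 10 : Nat) : Int) := by
        rw [hcast]
        exact_mod_cast PySem.Int.mod_natCast (r + sd) 10
      have hchar : PySem.Int.toChars (((r + sd) % 10 : Nat) : Int)
          = [((r + sd) % 10).digitChar] := by
        have hlt10 : (r + sd) % 10 < 10 := Nat.mod_lt _ (by norm_num)
        simp only [PySem.Int.toChars]
        rw [if_neg (Int.not_lt.mpr (Int.natCast_nonneg _)), Int.toNat_natCast, Nat.toDigits_of_lt_base hlt10]
      rw [hrem, hmod, hchar]
      have hinv' : (r + sd) / 10 + (ls.map (fun n => pvVal n / 10 ^ (i + 1))).sum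
          = pvN ls / 10 ^ (i + 1) := by
        rw [← hsg, hNsucc]
        omega
      rw [ih (i + 1) ((r + sd) / 10) (res ++ [((r + sd) % 10).digitChar]) (by omega) hinv']
      have hk' : pvMaxLen ls - i = (pvMaxLen ls - (i + 1)) + 1 := by omega
      rw [hk']
      show res ++ [((r + sd) % 10).digitChar] ++ pvLE (pvN ls / 10 ^ (i + 1)) (pvMaxLen ls - (i + 1))
          = res ++ ((pvN ls / 10 ^ i % 10).digitChar :: pvLE (pvN ls / 10 ^ i / 10) (pvMaxLen ls - (i + 1)))
      have hdig : (r + sd) % 10 = pvN ls / 10 ^ i % 10 := by omega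
      rw [hdig, hNsucc, List.append_assoc]
      rfl
    · have h0 : pvMaxLen ls - i = 0 := by omega
      rw [h0]
      exact loopA_done ls hd i r res (by omega) hinv

theorem pvLE_reverse :
    ∀ (k m : Nat), (pvLE m k).reverse =
      if k = 0 ∧ m = 0 then []
      else List.replicate (k - (Nat.toDigits 10 m).length) '0' ++ Nat.toDigits 10 m := by
  intro k
  induction k with
  | zero =>
    intro m
    by_cases hm : m = 0
    · simp [pvLE, hm]
    · have hlen : 1 ≤ (Nat.toDigits 10 m).length := Nat.length_toDigits_pos
      simp [pvLE, hm]
  | succ k ih =>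
    intro m
    simp only [pvLE, List.reverse_cons, ih (m / 10)]
    by_cases hm : m < 10
    · have hd0 : m / 10 = 0 := Nat.div_eq_of_lt hm
      have hmod : m % 10 = m := Nat.mod_eq_of_lt hm
      rw [hd0, hmod]
      by_cases hk : k = 0
      · subst hk
        simp [Nat.toDigits_of_lt_base hm]
      · rw [if_neg (by simp [hk]), if_neg (by simp)]
        rw [Nat.toDigits_zero, Nat.toDigits_of_lt_base hm]
        have hrep : List.replicate (k - 1) '0' ++ ['0'] = List.replicate k '0' := by
          have hk1 : k = (k - 1) + 1 := by omega
          rw [hk1, List.replicate_succ']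
          simp
        rw [show (['0'] : List Char).length = 1 from rfl,
            show ([m.digitChar] : List Char).length = 1 from rfl,
            show k + 1 - 1 = k from rfl,
            hrep]
    · have hd0 : m / 10 ≠ 0 := by omega
      have hm0 : m ≠ 0 := by omega
      have hsplit : Nat.toDigits 10 m = Nat.toDigits 10 (m / 10) ++ [(m % 10).digitChar] := by
        rw [Nat.toDigits_eq_if (by norm_num)]
        rw [if_neg (by omega)]
      rw [if_neg (by simp [hd0]), if_neg (by simp [hm0]), hsplit]
      have hlen : (Nat.toDigits 10 (m / 10) ++ [(m % 10).digitChar]).length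
          = (Nat.toDigits 10 (m / 10)).length + 1 := by simp
      rw [hlen]
      have hk3 : k + 1 - ((Nat.toDigits 10 (m / 10)).length + 1)
          = k - (Nat.toDigits 10 (m / 10)).length := by omega
      rw [hk3, List.append_assoc]

-- B-side lemmas

theorem horner_eq :
    ∀ (cs : List Char), pvAllDig cs → ∀ a : Nat,
      cs.foldl (fun n c => 10 * n + pvDigit c) (a : Int) =
        ((cs.foldl (fun n c => 10 * n + (c.toNat - 48)) a : Nat) : Int) := by
  intro cs
  induction cs with
  | nil => intro _ a; simp
  | cons c t ih =>
    intro hd a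
    rw [List.foldl_cons, List.foldl_cons, pvDigit_eq (hd c (List.mem_cons_self ..))]
    have hcast : (10 * (a : Int) + ((c.toNat - 48 : Nat) : Int))
        = ((10 * a + (c.toNat - 48) : Nat) : Int) := by push_cast; ring
    rw [hcast]
    exact ih (fun x hx => hd x (List.mem_cons_of_mem _ hx)) _

theorem width_eq :
    ∀ (xa : List String) (a : Nat),
      xa.foldl (fun w x => max w (PySem.Str.len x)) (a : Int)
        = (((xa.map String.toList).foldl (fun m n => max m n.length) a : Nat) : Int) := by
  intro xa
  induction xa with
  | nil => intro a; simp
  | cons x t ih =>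
    intro a
    rw [List.foldl_cons, List.map_cons, List.foldl_cons]
    have hlen : PySem.Str.len x = ((x.toList.length : Nat) : Int) := by
      rw [PySem.Str.len_eq]
    have hcast : max (a : Int) (PySem.Str.len x) = ((max a x.toList.length : Nat) : Int) := by
      rw [hlen]
      push_cast
      rfl
    rw [hcast]
    exact ih _

theorem total_eq (xa : List String) (hpre : ∀ s ∈ xa, pvAllDig s.toList) :
    xa.foldl (fun t x => t + x.toList.foldl (fun n c => 10 * n + pvDigit c) 0) (0 : Int)
      = ((pvN (xa.map String.toList) : Nat) : Int) := by
  rw [PySem.List.foldl_add]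
  simp only [zero_add]
  have hmap : xa.map (fun x => x.toList.foldl (fun n c => 10 * n + pvDigit c) (0 : Int))
      = xa.map (fun x => ((pvVal x.toList : Nat) : Int)) := by
    apply List.map_congr_left
    intro x hx
    have hh := horner_eq x.toList (hpre x hx) 0
    simp only [Nat.cast_zero] at hh
    rw [hh, pvVal]
  rw [hmap, pvN, List.map_map]
  rw [show (fun x : String => ((pvVal x.toList : Nat) : Int))
        = (Nat.cast ∘ fun x : String => pvVal x.toList) from rfl]
  rw [← List.map_map, ← Nat.cast_list_sum]
  rfl

theorem zfill_toDigits (m L : Nat) :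
    PySem.Chars.zfill (Nat.toDigits 10 m) (L : Int)
      = List.replicate (L - (Nat.toDigits 10 m).length) '0' ++ Nat.toDigits 10 m := by
  by_cases h : (L : Int) ≤ (Nat.toDigits 10 m).length
  · have hL : L ≤ (Nat.toDigits 10 m).length := by exact_mod_cast h
    rw [PySem.Chars.zfill.eq_def, if_pos h]
    rw [Nat.sub_eq_zero_of_le hL]
    simp
  · cases hcs : Nat.toDigits 10 m with
    | nil =>
      have hp := Nat.length_toDigits_pos (b := 10) (n := m)
      rw [hcs] at hp
      simp at hp
    | cons c rest =>
      have hcdig : c.isDigit = true :=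
        Nat.isDigit_of_mem_toDigits (by norm_num) (by norm_num)
          (hcs ▸ List.mem_cons_self ..)
      have hne : ¬ (c = '+' ∨ c = '-') := by
        rintro (rfl | rfl) <;> simp [Char.isDigit] at hcdig
      rw [PySem.Chars.zfill.eq_def]
      rw [hcs] at h
      rw [if_neg h]
      simp only [if_neg hne]
      rw [Int.toNat_natCast L]

theorem string_toList_inj {s t : String} (h : s.toList = t.toList) : s = t := by
  have hmk : String.ofList s.toList = String.ofList t.toList := by rw [h]
  simpa using hmk

-- ===== VERDICT (by name: the statement is the Claim_ definition above) =====
theorem stringAdd_spec : Claim_equal_stringAdd := by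
  unfold Claim_equal_stringAdd
  intro xa _hdom hpre
  unfold Spec_stringAdd
  have hpre' : ∀ s ∈ xa, pvAllDig s.toList := by
    unfold Pre_stringAdd at hpre
    simp only [List.all_eq_true] at hpre
    intro s hs c hc
    exact hpre s hs c hc
  set ls := xa.map String.toList with hls
  have hd : ∀ n ∈ ls, pvAllDig n := by
    intro n hn
    obtain ⟨s, hs, rfl⟩ := List.mem_map.mp hn
    exact hpre' s hs
  have hA : stringAdd xa = String.ofList ((pvLE (pvN ls) (pvMaxLen ls)).reverse) := by
    unfold stringAdd
    have h0 : (0 : Int) = ((0 : Nat) : Int) := rfl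
    rw [← hls, h0]
    rw [loopA_eq ls hd (pvMaxLen ls) 0 0 [] (by omega) (by simp [pvN, pow_zero, Nat.div_one])]
    simp
  by_cases hL : pvMaxLen ls = 0
  · have hN : pvN ls = 0 := by
      apply List.sum_eq_zero
      intro x hx
      obtain ⟨n, hn, rfl⟩ := List.mem_map.mp hx
      have h1 := (PySem.List.le_foldl_max_nat ls (fun n => n.length) 0).2 n hn
      have h2 : n.length = 0 := by unfold pvMaxLen at hL; omega
      have h3 : n = [] := List.length_eq_zero_iff.mp h2
      simp [h3, pvVal]
    have hB : stringAdd_alt xa = "" := by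
      unfold stringAdd_alt
      have hw := width_eq xa 0
      rw [← hls] at hw
      simp only [Nat.cast_zero] at hw
      rw [hw]
      have hL' : (ls.foldl (fun m n => max m n.length) 0) = 0 := hL
      rw [if_pos (by exact_mod_cast hL')]
    rw [hA, hB, hN, hL]
    simp [pvLE]
  · have hB : stringAdd_alt xa
        = PySem.Str.zfill (PySem.Int.toStr ((pvN ls : Nat) : Int)) ((pvMaxLen ls : Nat) : Int) := by
      unfold stringAdd_alt
      have hw := width_eq xa 0
      rw [← hls] at hw
      simp only [Nat.cast_zero] at hw
      rw [hw]
      have hL' : ¬ (ls.foldl (fun m n => max m n.length) 0) = 0 := hL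
      rw [if_neg (by exact_mod_cast hL')]
      rw [total_eq xa hpre', ← hls]
      rfl
    rw [hA, hB]
    apply string_toList_inj
    rw [PySem.Str.toList_zfill]
    have htl : (PySem.Int.toStr ((pvN ls : Nat) : Int)).toList = Nat.toDigits 10 (pvN ls) := by
      rw [PySem.Int.toList_toStr]
      simp only [PySem.Int.toChars]
      rw [if_neg (Int.not_lt.mpr (Int.natCast_nonneg _)), Int.toNat_natCast]
    rw [htl, zfill_toDigits]
    have hofl : (String.ofList ((pvLE (pvN ls) (pvMaxLen ls)).reverse)).toList
        = (pvLE (pvN ls) (pvMaxLen ls)).reverse := by simp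
    rw [hofl, pvLE_reverse]
    rw [if_neg (by simp [hL])]
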